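-- pv_equiv track=rewrite | github.com/ddsuhaimi/bootcamp_arkademy | no4.py | split_and_sort
-- ===== SOURCE A (Python) =====
-- def split_and_sort(number):
--     portions = str(number).split('0')
--     sorted_portions = []
--     for portion in portions:
--         digit = [int(i) for i in portion]
--         digit.sort()
--         sorted_portions.append(digit)
--
--     sorted_digit = []
--     for i in sorted_portions:
--         for j in i:
--             sorted_digit.append(j)
--
--     result = ''.join([str(x) for x in sorted_digit])
--     return int(result)
-- ===== SOURCE B (Python) =====
-- def split_and_sort(number):
--     # Single pass over str(number) with a digit-count array; each '0' flushes
--     # the counted portion in increasing digit order. Same result as sorting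
--     # each zero-delimited portion and concatenating.
--     counts = [0] * 10
--     out = []
--     for ch in str(number):
--         d = int(ch)
--         if d == 0:
--             for v in range(1, 10):
--                 out.append(str(v) * counts[v])
--             counts = [0] * 10
--         else:
--             counts[d] += 1
--     for v in range(1, 10):
--         out.append(str(v) * counts[v])
--     return int(''.join(out))
-- ===== Notes on version B (the rewrite author's own statement) =====
-- stated objective: alternative
-- what changed: Replaces split-into-portions + per-portion list sort + nested append loops by a single streaming pass over the digit characters that maintains a 10-entry count array and flushes it in increasing digit order at every '0' and at the end (counting sort, no split and no comparison sort).
import Mathlib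
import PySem

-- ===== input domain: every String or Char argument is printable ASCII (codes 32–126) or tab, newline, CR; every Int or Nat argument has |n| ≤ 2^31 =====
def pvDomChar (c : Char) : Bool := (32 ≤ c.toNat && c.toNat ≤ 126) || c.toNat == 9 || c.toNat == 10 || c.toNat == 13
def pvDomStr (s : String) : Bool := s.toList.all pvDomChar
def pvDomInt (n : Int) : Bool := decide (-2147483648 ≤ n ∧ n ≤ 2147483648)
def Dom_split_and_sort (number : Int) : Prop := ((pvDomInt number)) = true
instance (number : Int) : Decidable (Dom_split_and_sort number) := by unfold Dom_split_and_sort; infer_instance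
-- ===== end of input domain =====

-- B replaces "split on '0', sort each portion, concatenate" by one streaming pass with a
-- 10-entry digit-count array that is flushed in increasing order at each '0' and at the end
-- (a counting sort; no split, no comparison sort). Objective: alternative algorithm.

-- ===== PORT A =====
-- str(number).split('0'); per portion: [int(i) for i in portion], .sort(), append;
-- then flatten via two append loops, join str(x), int(result).
-- int(…) is ported as (PySem.Int.ofChars? …).getD 0: the none case (ValueError: '-' in a
-- negative number's digits, or int('') when number ≤ 0 makes the final string empty) is
-- exactly what Pre_split_and_sort excludes.
def split_and_sort (number : Int) : Int :=
  let portions := PySem.Chars.splitOn (PySem.Int.toChars number) ['0']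
  let sorted_portions := portions.foldl
    (fun acc portion =>
      let digit := portion.map (fun i => (PySem.Int.ofChars? [i]).getD 0)
      acc ++ [PySem.List.sorted digit (fun x => x) false]) []
  let sorted_digit := sorted_portions.foldl
    (fun acc i => i.foldl (fun acc2 j => acc2 ++ [j]) acc) []
  let result := PySem.Chars.join [] (sorted_digit.map (fun x => PySem.Int.toChars x))
  (PySem.Int.ofChars? result).getD 0

-- ===== PORT B =====
-- Python str(v) * n (n ≤ 0 gives ''): exact.
def pvRepeat (s : List Char) (n : Int) : List Char :=
  (List.replicate n.toNat s).flatten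

-- the two 'for v in range(1, 10): out.append(str(v) * counts[v])' flush loops of Source B
def pvFlush (counts : List Int) (out : List (List Char)) : List (List Char) :=
  (PySem.List.pyRange 1 10 1).foldl
    (fun o v => o ++ [pvRepeat (PySem.Int.toChars v) (PySem.List.pyGetD counts v 0)]) out

-- loop body of Source B: d = int(ch); flush-and-reset on 0, else counts[d] += 1
def pvStep (st : List Int × List (List Char)) (ch : Char) : List Int × List (List Char) :=
  let d := (PySem.Int.ofChars? [ch]).getD 0
  if d = 0 then (List.replicate 10 0, pvFlush st.1 st.2)
  else (PySem.List.pySetD st.1 d (PySem.List.pyGetD st.1 d 0 + 1), st.2)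

def split_and_sort_alt (number : Int) : Int :=
  let st := (PySem.Int.toChars number).foldl pvStep (List.replicate 10 0, [])
  let out := pvFlush st.1 st.2
  (PySem.Int.ofChars? (PySem.Chars.join [] out)).getD 0

-- ===== PRECONDITION & SPEC =====
-- Pre_ excludes exactly the inputs where the Python A raises ValueError: number ≤ 0
-- (int('-') on the sign of a negative, int('') when all digits are zero, i.e. number = 0).
def Pre_split_and_sort (number : Int) : Prop := 1 ≤ number
instance (number : Int) : Decidable (Pre_split_and_sort number) := by unfold Pre_split_and_sort; infer_instance
def pvWitness_split_and_sort : Int := (10230045)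

def Spec_split_and_sort (number : Int) (out : Int) : Prop := out = split_and_sort_alt number
instance (number : Int) (out : Int) : Decidable (Spec_split_and_sort number out) := by unfold Spec_split_and_sort; infer_instance

-- ===== CLAIM (what is proved, stated in full; the proofs are below) =====
def Claim_equal_split_and_sort : Prop := ∀ (number : Int), Dom_split_and_sort number → Pre_split_and_sort number → Spec_split_and_sort number (split_and_sort number)

-- ===== LEMMAS AND PROOFS =====

-- digit value of a character, as both ports compute it
def pvDv (c : Char) : Int := (PySem.Int.ofChars? [c]).getD 0

-- simple structural specification of str.split('0')
def pvSplit : List Char → List (List Char)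
  | [] => [[]]
  | c :: rest =>
    if c = '0' then [] :: pvSplit rest
    else match pvSplit rest with
      | [] => [[c]]
      | p :: ps => (c :: p) :: ps

def pvMergeFirst {α : Type} (q : List α) : List (List α) → List (List α)
  | [] => [q]
  | p :: ps => (q ++ p) :: ps

-- count vector of a list of digit values, as Source B's counts array holds it
def pvCounts (q : List Int) : List Int :=
  (List.range 10).map (fun (d : Nat) => (q.count (d : Int) : Int))

-- the blocks of a counting sort of q, digits 1..9 in increasing order
def pvBlocks (q : List Int) : List Int :=
  ([1, 2, 3, 4, 5, 6, 7, 8, 9] : List Int).flatMap (fun v => List.replicate (q.count v) v)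

-- the characters a sorted portion (list of digit values) contributes to A's result
def pvSortedChars (q : List Int) : List Char :=
  ((PySem.List.sorted q (fun x => x) false).map PySem.Int.toChars).flatten

-- A's whole result string from the portions' digit-value lists
def pvConcatSorted (Ps : List (List Int)) : List Char :=
  (Ps.map pvSortedChars).flatten

theorem pvSplit_ne_nil (l : List Char) : pvSplit l ≠ [] := by
  cases l with
  | nil => simp [pvSplit]
  | cons c rest =>
    simp only [pvSplit]; split
    · simp
    · split <;> simp

theorem pvDigit_mem (m : Nat) : ∀ c ∈ Nat.toDigits 10 m, ∃ d, d < 10 ∧ c = Nat.digitChar d := by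
  induction m using Nat.strong_induction_on with
  | _ m ih =>
    rw [Nat.toDigits_eq_if (by norm_num)]
    split
    · intro c hc; simp at hc; exact ⟨m, by omega, hc⟩
    · intro c hc
      rw [List.mem_append] at hc
      rcases hc with h | h
      · exact ih (m / 10) (by omega) c h
      · simp at h; exact ⟨m % 10, by omega, h⟩

theorem pvDv_digitChar (d : Nat) (hd : d < 10) : pvDv (Nat.digitChar d) = (d : Int) := by
  interval_cases d <;> decide

theorem pvDigitChar_eq_zero_iff (d : Nat) (hd : d < 10) : Nat.digitChar d = '0' ↔ d = 0 := by
  interval_cases d <;> decide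

theorem pvSplitOn_go_eq (fuel : Nat) : ∀ (l : List Char) (cur : List Char) (acc : List (List Char)),
    l.length ≤ fuel →
    PySem.Chars.splitOn.go ['0'] fuel l cur acc = acc.reverse ++ pvMergeFirst cur.reverse (pvSplit l) := by
  induction fuel with
  | zero =>
    intro l cur acc h
    have : l = [] := by cases l <;> simp_all
    subst this
    simp [PySem.Chars.splitOn.go, pvSplit, pvMergeFirst]
  | succ fuel ih =>
    intro l cur acc h
    cases l with
    | nil => simp [PySem.Chars.splitOn.go, pvSplit, pvMergeFirst]
    | cons c rest =>
      rw [PySem.Chars.splitOn.go]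
      by_cases hc : c = '0'
      · subst hc
        rw [if_pos (by simp [List.isPrefixOf])]
        simp only [List.length_cons, List.length_nil, List.drop_succ_cons, List.drop_zero]
        rw [ih rest [] (cur.reverse :: acc) (by simpa using Nat.le_of_succ_le_succ h)]
        simp only [pvSplit, List.reverse_nil, List.reverse_cons]
        cases hs : pvSplit rest with
        | nil => exact absurd hs (pvSplit_ne_nil rest)
        | cons p ps => simp [pvMergeFirst]
      · have : ¬ (['0'].isPrefixOf (c :: rest) = true) := by
          simp [List.isPrefixOf]; intro hb; exact hc (by simpa using hb.symm)
        rw [if_neg this]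
        rw [ih rest (c :: cur) acc (by simpa using Nat.le_of_succ_le_succ h)]
        simp only [pvSplit, if_neg hc, List.reverse_cons]
        cases hs : pvSplit rest with
        | nil => exact absurd hs (pvSplit_ne_nil rest)
        | cons p ps => simp [pvMergeFirst]

theorem pvSplitOn_eq (l : List Char) : PySem.Chars.splitOn l ['0'] = pvSplit l := by
  rw [PySem.Chars.splitOn, pvSplitOn_go_eq (l.length + 1) l [] [] (by omega)]
  cases hs : pvSplit l with
  | nil => exact absurd hs (pvSplit_ne_nil l)
  | cons p ps => simp [pvMergeFirst]

theorem pvJoin_nil (ps : List (List Char)) : PySem.Chars.join [] ps = ps.flatten := by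
  rw [PySem.Chars.join]
  induction ps with
  | nil => rfl
  | cons p ps ih =>
    cases ps with
    | nil => simp [List.intercalate]
    | cons q qs =>
      rw [List.intercalate] at *
      simp [List.intersperse] at *
      simpa using ih

theorem pvBlocks_perm (q : List Int) (hq : ∀ x ∈ q, 1 ≤ x ∧ x ≤ 9) : (pvBlocks q).Perm q := by
  induction q with
  | nil => simp [pvBlocks]
  | cons a q ih =>
    have ha := hq a (by simp)
    have hq' : ∀ x ∈ q, 1 ≤ x ∧ x ≤ 9 := fun x hx => hq x (List.mem_cons_of_mem _ hx)
    have step : (pvBlocks (a :: q)).Perm (a :: pvBlocks q) := by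
      simp only [pvBlocks, List.flatMap_cons, List.flatMap_nil, List.count_cons, List.append_nil]
      obtain ⟨h1, h9⟩ := ha
      interval_cases a <;> simp [List.replicate_succ, ← List.append_assoc] <;>
        exact List.perm_middle.trans (by simp [List.append_assoc])
    exact step.trans ((ih hq').cons a)

theorem pvBlocks_pairwise (q : List Int) : (pvBlocks q).Pairwise (· ≤ ·) := by
  simp only [pvBlocks, List.flatMap_cons, List.flatMap_nil, List.append_nil]
  simp [List.pairwise_append, List.pairwise_replicate, List.mem_replicate]
  and_intros <;> intro h b hb <;> omega

theorem pvSorted_eq_blocks (q : List Int) (hq : ∀ x ∈ q, 1 ≤ x ∧ x ≤ 9) :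
    PySem.List.sorted q (fun x => x) false = pvBlocks q :=
  PySem.List.sorted_id_eq_of_perm_of_pairwise q (pvBlocks q) (pvBlocks_perm q hq) (pvBlocks_pairwise q)

theorem pvFlush_join (q : List Int) (out : List (List Char)) (hq : ∀ x ∈ q, 1 ≤ x ∧ x ≤ 9) :
    (pvFlush (pvCounts q) out).flatten = out.flatten ++ pvSortedChars q := by
  rw [pvFlush]
  have hr : PySem.List.pyRange 1 10 1 = [1,2,3,4,5,6,7,8,9] := by decide
  rw [hr, PySem.List.foldl_append_singleton_eq_map, List.flatten_append]
  congr 1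
  rw [pvSortedChars, pvSorted_eq_blocks q hq, pvBlocks]
  simp only [List.flatMap_cons, List.flatMap_nil, List.append_nil, List.map_cons, List.map_nil,
    List.map_append, List.map_replicate, List.flatten_append, List.flatten_cons, List.flatten_nil]
  have h2 : ∀ (v : Nat), 1 ≤ v → v ≤ 9 →
      pvRepeat (PySem.Int.toChars (v:Int)) (PySem.List.pyGetD (pvCounts q) (v:Int) 0)
        = (List.replicate (q.count (v:Int)) (PySem.Int.toChars (v:Int))).flatten := by
    intro v hv1 hv9
    rw [PySem.List.pyGetD_natCast, pvCounts, PySem.List.getD_map_range _ _ _ _ (by omega),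
      pvRepeat, Int.toNat_natCast]
  have e1 := h2 1 (by norm_num) (by norm_num)
  have e2 := h2 2 (by norm_num) (by norm_num)
  have e3 := h2 3 (by norm_num) (by norm_num)
  have e4 := h2 4 (by norm_num) (by norm_num)
  have e5 := h2 5 (by norm_num) (by norm_num)
  have e6 := h2 6 (by norm_num) (by norm_num)
  have e7 := h2 7 (by norm_num) (by norm_num)
  have e8 := h2 8 (by norm_num) (by norm_num)
  have e9 := h2 9 (by norm_num) (by norm_num)
  norm_num at e1 e2 e3 e4 e5 e6 e7 e8 e9
  rw [e1, e2, e3, e4, e5, e6, e7, e8, e9]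

theorem pvCounts_nil : List.replicate 10 (0 : Int) = pvCounts [] := by
  decide

theorem pvCounts_snoc (q : List Int) (n : Nat) (h1 : 1 ≤ n) (h9 : n ≤ 9) :
    PySem.List.pySetD (pvCounts q) (n : Int) (PySem.List.pyGetD (pvCounts q) (n : Int) 0 + 1)
      = pvCounts (q ++ [(n : Int)]) := by
  rw [PySem.List.pyGetD_natCast, PySem.List.pySetD_natCast, pvCounts, pvCounts,
    PySem.List.getD_map_range _ _ _ _ (by omega)]
  apply List.ext_getElem
  · simp
  intro i hi hi2
  rw [List.getElem_set]
  by_cases h : n = i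
  · subst h
    simp [List.getElem_map, List.count_append]
  · rw [if_neg h]
    simp only [List.getElem_map, List.getElem_range]
    simp [List.count_append, List.count_singleton]
    omega

-- loop invariant of Source B's single pass
theorem pvLoop (L : List Char) : ∀ (q : List Int) (out : List (List Char)),
    (∀ c ∈ L, ∃ d, d < 10 ∧ c = Nat.digitChar d) →
    (∀ x ∈ q, 1 ≤ x ∧ x ≤ 9) →
    (pvFlush (L.foldl pvStep (pvCounts q, out)).1 (L.foldl pvStep (pvCounts q, out)).2).flatten
      = out.flatten ++ pvConcatSorted (pvMergeFirst q ((pvSplit L).map (List.map pvDv))) := by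
  induction L with
  | nil =>
    intro q out _ hq
    simp only [List.foldl_nil]
    rw [pvFlush_join q out hq]
    simp [pvSplit, pvMergeFirst, pvConcatSorted]
  | cons c L ih =>
    intro q out hdig hq
    obtain ⟨d, hd10, rfl⟩ := hdig _ (List.mem_cons_self)
    have hdig' : ∀ x ∈ L, ∃ d, d < 10 ∧ x = Nat.digitChar d :=
      fun x hx => hdig x (List.mem_cons_of_mem _ hx)
    simp only [List.foldl_cons]
    by_cases hz : d = 0
    · subst hz
      have hc0 : (PySem.Int.ofChars? [Nat.digitChar 0]).getD 0 = (0:Int) := by decide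
      have hstep : pvStep (pvCounts q, out) (Nat.digitChar 0)
          = (pvCounts [], pvFlush (pvCounts q) out) := by
        simp only [pvStep, hc0, if_pos]
        rw [pvCounts_nil]
      rw [hstep, ih [] (pvFlush (pvCounts q) out) hdig' (by simp)]
      rw [pvFlush_join q out hq]
      have hch : Nat.digitChar 0 = '0' := by decide
      rw [hch]
      simp only [pvSplit, if_pos rfl]
      cases hs : pvSplit L with
      | nil => exact absurd hs (pvSplit_ne_nil L)
      | cons p ps => simp [pvMergeFirst, pvConcatSorted]
    · have hdv : pvDv (Nat.digitChar d) = (d : Int) := pvDv_digitChar d hd10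
      have hne : (PySem.Int.ofChars? [Nat.digitChar d]).getD 0 ≠ (0:Int) := by
        rw [show (PySem.Int.ofChars? [Nat.digitChar d]).getD 0 = pvDv (Nat.digitChar d) from rfl, hdv]
        exact_mod_cast hz
      have hstep : pvStep (pvCounts q, out) (Nat.digitChar d)
          = (pvCounts (q ++ [(d : Int)]), out) := by
        simp only [pvStep, if_neg hne]
        rw [show (PySem.Int.ofChars? [Nat.digitChar d]).getD 0 = ((d:Nat) : Int) from hdv]
        rw [pvCounts_snoc q d (by omega) (by omega)]
      rw [hstep, ih (q ++ [(d:Int)]) out hdig' ?side]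
      case side =>
        intro x hx
        rcases List.mem_append.mp hx with h | h
        · exact hq x h
        · simp at h; subst h; constructor <;> [exact_mod_cast Nat.one_le_iff_ne_zero.mpr hz; exact_mod_cast by omega]
      have hch : Nat.digitChar d ≠ '0' := fun hc => hz ((pvDigitChar_eq_zero_iff d hd10).mp hc)
      congr 2
      simp only [pvSplit, if_neg hch]
      cases hs : pvSplit L with
      | nil => exact absurd hs (pvSplit_ne_nil L)
      | cons p ps =>
        simp [pvMergeFirst, hdv]
theorem pvFlattenSorted (Qs : List (List Int)) :
    (((Qs.map (fun p => PySem.List.sorted p (fun x => x) false)).flatten).map PySem.Int.toChars).flatten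
      = pvConcatSorted Qs := by
  induction Qs with
  | nil => simp [pvConcatSorted]
  | cons p ps ih =>
    simp only [List.map_cons, List.flatten_cons, List.map_append, List.flatten_append, ih,
      pvConcatSorted, pvSortedChars]

theorem split_and_sort_eq (number : Int) (h : 1 ≤ number) :
    split_and_sort number = split_and_sort_alt number := by
  have hn : PySem.Int.toChars number = Nat.toDigits 10 number.toNat := by
    rw [PySem.Int.toChars, if_neg (by omega)]
  have hdig : ∀ c ∈ PySem.Int.toChars number, ∃ d, d < 10 ∧ c = Nat.digitChar d := by
    rw [hn]; exact pvDigit_mem number.toNat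
  have hB := pvLoop (PySem.Int.toChars number) [] [] hdig (by simp)
  rw [split_and_sort, split_and_sort_alt]
  simp only [pvSplitOn_eq, PySem.List.foldl_append_singleton]
  rw [PySem.List.foldl_append_singleton_eq_map]
  rw [show (fun (acc i : List Int) => acc ++ i) = (fun acc i => acc ++ (fun x => x) i) from rfl,
    PySem.List.foldl_append_eq_flatMap]
  rw [pvJoin_nil, pvJoin_nil, pvCounts_nil]
  rw [hB]
  congr 1
  simp only [List.nil_append, List.flatten_nil]
  have hmn : pvMergeFirst ([] : List Int) ((pvSplit (PySem.Int.toChars number)).map (List.map pvDv))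
      = (pvSplit (PySem.Int.toChars number)).map (List.map pvDv) := by
    cases hs : pvSplit (PySem.Int.toChars number) with
    | nil => exact absurd hs (pvSplit_ne_nil _)
    | cons p ps => simp [pvMergeFirst]
  rw [hmn]
  have hfs := pvFlattenSorted ((pvSplit (PySem.Int.toChars number)).map (List.map pvDv))
  rw [List.map_map] at hfs
  rw [← hfs]
  show PySem.Int.ofChars? _ = PySem.Int.ofChars? _
  congr 1
  rw [show (fun i => (PySem.Int.ofChars? [i]).getD 0) = pvDv from rfl]
  simp [List.flatMap_def, Function.comp_def]

-- ===== VERDICT (by name: the statement is the Claim_ definition above) =====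
theorem split_and_sort_spec : Claim_equal_split_and_sort := by
  intro number _ hpre
  exact split_and_sort_eq number hpre
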